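-- pv_equiv track=rewrite | github.com/GabiNeme/orca-divpes | src/carreira.py | _letra_maxima_para_nivel
-- ===== SOURCE A (Python) =====
-- def _letra_maxima_para_nivel(numero_nivel: int) -> str:
--     """Retorna a máxima letra que é possível ter para um determinado nível."""
--
--     transicao_para_letra = [
--         (1, "A"),
--         (3, "B"),
--         (6, "C"),
--         (8, "D"),
--         (11, "E"),
--     ]
--
--     for i in reversed(range(len(transicao_para_letra))):
--         if transicao_para_letra[i][0] <= numero_nivel:
--             return transicao_para_letra[i][1]
-- ===== SOURCE B (Python) =====
-- def _letra_maxima_para_nivel(numero_nivel: int) -> str: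
--     """Retorna a máxima letra que é possível ter para um determinado nível."""
--     thresholds = [1, 3, 6, 8, 11]
--     letters = ["A", "B", "C", "D", "E"]
--     # bisect_right by hand (A's module imports nothing, so no bisect import)
--     lo, hi = 0, len(thresholds)
--     while lo < hi:
--         mid = (lo + hi) // 2
--         if numero_nivel < thresholds[mid]:
--             hi = mid
--         else:
--             lo = mid + 1
--     return letters[lo - 1] if lo else None
-- ===== Notes on version B (the rewrite author's own statement) =====
-- stated objective: alternative
-- what changed: Replaced A's linear reverse scan over the (threshold, letter) table with a hand-written bisect_right binary search on a sorted thresholds list indexing a parallel letters list (None when the index is 0).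
import Mathlib
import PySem

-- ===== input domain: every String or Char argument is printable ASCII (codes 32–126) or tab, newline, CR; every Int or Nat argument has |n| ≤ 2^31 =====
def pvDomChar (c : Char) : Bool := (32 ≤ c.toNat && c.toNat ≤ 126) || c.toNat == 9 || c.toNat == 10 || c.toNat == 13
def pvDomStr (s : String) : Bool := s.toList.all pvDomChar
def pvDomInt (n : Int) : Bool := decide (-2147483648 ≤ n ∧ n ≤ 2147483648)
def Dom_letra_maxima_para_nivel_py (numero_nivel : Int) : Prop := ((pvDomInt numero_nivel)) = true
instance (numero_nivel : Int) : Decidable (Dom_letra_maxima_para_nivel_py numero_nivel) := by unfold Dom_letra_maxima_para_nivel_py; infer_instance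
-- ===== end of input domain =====

-- B replaces A's linear reverse scan of the threshold table with a binary-search (bisect_right) index into parallel threshold/letter lists (alternative structure, same behaviour).


-- ===== PORT A =====
-- loop 'for i in reversed(range(len(tab)))' with early return: recursion over the index list
def pvLoopA (tab : List (Int × String)) (x : Int) : List Nat → Option String
  | [] => none
  | i :: rest =>
    let t := tab.getD i (0, "")
    if t.1 ≤ x then some t.2 else pvLoopA tab x rest

def letra_maxima_para_nivel_py (numero_nivel : Int) : Option String :=
  let tab : List (Int × String) := [(1, "A"), (3, "B"), (6, "C"), (8, "D"), (11, "E")]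
  pvLoopA tab numero_nivel (List.range tab.length).reverse

-- ===== PORT B =====
-- Source B's hand-written bisect_right while-loop, recursion on hi - lo
def pvBisectRight (x : Int) (ts : List Int) (lo hi : Nat) : Nat :=
  if h : lo < hi then
    let mid := (lo + hi) / 2
    if x < ts.getD mid 0 then pvBisectRight x ts lo mid
    else pvBisectRight x ts (mid + 1) hi
  else lo
termination_by hi - lo
decreasing_by
  · have : mid < hi := by omega
    omega
  · have : lo ≤ mid := by omega
    omega

def letra_maxima_para_nivel_py_alt (numero_nivel : Int) : Option String :=
  let thresholds : List Int := [1, 3, 6, 8, 11]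
  let letters : List String := ["A", "B", "C", "D", "E"]
  let lo := pvBisectRight numero_nivel thresholds 0 thresholds.length
  if lo ≠ 0 then some (letters.getD (lo - 1) "") else none

-- ===== PRECONDITION & SPEC =====
def Spec_letra_maxima_para_nivel_py (numero_nivel : Int) (out : Option String) : Prop := out = letra_maxima_para_nivel_py_alt numero_nivel
instance (numero_nivel : Int) (out : Option String) : Decidable (Spec_letra_maxima_para_nivel_py numero_nivel out) := by unfold Spec_letra_maxima_para_nivel_py; infer_instance

-- ===== CLAIM (what is proved, stated in full; the proofs are below) =====
def Claim_equal_letra_maxima_para_nivel_py : Prop := ∀ (numero_nivel : Int), Dom_letra_maxima_para_nivel_py numero_nivel → Spec_letra_maxima_para_nivel_py numero_nivel (letra_maxima_para_nivel_py numero_nivel)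

-- ===== LEMMAS AND PROOFS =====

-- ===== VERDICT (by name: the statement is the Claim_ definition above) =====
theorem letra_maxima_para_nivel_py_spec : Claim_equal_letra_maxima_para_nivel_py := by
  intro n _
  unfold Spec_letra_maxima_para_nivel_py letra_maxima_para_nivel_py letra_maxima_para_nivel_py_alt
  rcases lt_or_ge n 1 with h1 | h1
  · simp [pvLoopA, pvBisectRight, List.range, List.range.loop, h1.not_ge,
      show ¬ (3:Int) ≤ n by omega, show ¬ (6:Int) ≤ n by omega,
      show ¬ (8:Int) ≤ n by omega, show ¬ (11:Int) ≤ n by omega, show n < 1 from h1,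
      show n < 3 by omega, show n < 6 by omega]
  · rcases lt_or_ge n 3 with h2 | h2
    · simp [pvLoopA, pvBisectRight, List.range, List.range.loop, h1,
        show ¬ (3:Int) ≤ n from h2.not_ge, show ¬ (6:Int) ≤ n by omega,
        show ¬ (8:Int) ≤ n by omega, show ¬ (11:Int) ≤ n by omega,
        show ¬ n < 1 by omega, show n < 3 from h2, show n < 6 by omega]
    · rcases lt_or_ge n 6 with h3 | h3
      · simp [pvLoopA, pvBisectRight, List.range, List.range.loop, h2,
          show ¬ (6:Int) ≤ n from h3.not_ge, show ¬ (8:Int) ≤ n by omega,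
          show ¬ (11:Int) ≤ n by omega, show ¬ n < 3 by omega, show n < 6 from h3]
      · rcases lt_or_ge n 8 with h4 | h4
        · simp [pvLoopA, pvBisectRight, List.range, List.range.loop, h3,
            show ¬ (8:Int) ≤ n from h4.not_ge, show ¬ (11:Int) ≤ n by omega,
            show ¬ n < 6 by omega, show n < 8 from h4, show n < 11 by omega]
        · rcases lt_or_ge n 11 with h5 | h5
          · simp [pvLoopA, pvBisectRight, List.range, List.range.loop, h4,
              show ¬ (11:Int) ≤ n from h5.not_ge, show ¬ n < 6 by omega,
              show ¬ n < 8 by omega, show n < 11 from h5]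
          · simp [pvLoopA, pvBisectRight, List.range, List.range.loop, h5,
              show ¬ n < 6 by omega, show ¬ n < 11 by omega]
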